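-- pv_equiv track=rewrite | github.com/ThuTranggggg/TechShop | services/ai_service/modules/ai/application/services.py | _infer_user_intent
-- ===== SOURCE A (Python) =====
-- from typing import List, Optional, Dict, Any
--
-- def _infer_user_intent(events: List[Dict[str, Any]]) -> str:
--     if not events:
--         return "new_user"
--     recent_types = [event.get("event_type") for event in events[-5:]]
--     if "payment_success" in recent_types:
--         return "post_purchase"
--     if "order_created" in recent_types or "checkout_started" in recent_types:
--         return "purchase_intent"
--     if "add_to_cart" in recent_types:
--         return "cart_consideration"
--     if "chat_query" in recent_types:
--         return "guided_discovery"
--     return "browsing"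
-- ===== SOURCE B (Python) =====
-- from typing import List, Optional, Dict, Any
--
-- # priority table: event type -> (precedence, intent); smaller precedence wins
-- _TABLE = {
--     "payment_success": (0, "post_purchase"),
--     "order_created": (1, "purchase_intent"),
--     "checkout_started": (1, "purchase_intent"),
--     "add_to_cart": (2, "cart_consideration"),
--     "chat_query": (3, "guided_discovery"),
-- }
--
-- def _infer_user_intent(events: List[Dict[str, Any]]) -> str:
--     if not events:
--         return "new_user"
--     best = None
--     for event in events[-5:]:
--         hit = _TABLE.get(event.get("event_type"))
--         if hit is not None and (best is None or hit[0] < best[0]):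
--             best = hit
--     return best[1] if best is not None else "browsing"
-- ===== Notes on version B (the rewrite author's own statement) =====
-- stated objective: alternative
-- what changed: Replaced the four sequential membership scans over the recent-types list with a priority table (event type -> (precedence, intent)) and a single pass that keeps the hit with the smallest precedence.
import Mathlib
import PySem

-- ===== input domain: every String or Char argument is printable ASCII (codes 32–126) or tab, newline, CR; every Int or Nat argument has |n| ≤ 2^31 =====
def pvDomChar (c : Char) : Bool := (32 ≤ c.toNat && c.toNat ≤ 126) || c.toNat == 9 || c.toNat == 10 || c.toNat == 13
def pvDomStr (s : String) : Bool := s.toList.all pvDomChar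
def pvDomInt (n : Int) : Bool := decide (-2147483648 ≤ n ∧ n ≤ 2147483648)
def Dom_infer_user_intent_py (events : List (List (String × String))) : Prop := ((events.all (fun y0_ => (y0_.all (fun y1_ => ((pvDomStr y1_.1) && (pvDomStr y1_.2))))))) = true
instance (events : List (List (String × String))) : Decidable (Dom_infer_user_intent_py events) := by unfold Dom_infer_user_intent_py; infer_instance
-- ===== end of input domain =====

-- B replaces A's four sequential membership scans with a priority table and one min-precedence pass (alternative decomposition, same cost class).


-- ===== PORT A =====
-- event.get("event_type") : first-match lookup in the event's association list
def pvGetType (e : List (String × String)) : Option String :=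
  PySem.Dict.get? ⟨e⟩ "event_type"

def infer_user_intent_py (events : List (List (String × String))) : String :=
  if events = [] then "new_user"
  else
    let recent_types := (PySem.List.slice events (some (-5)) none).map pvGetType
    if recent_types.contains (some "payment_success") then "post_purchase"
    else if recent_types.contains (some "order_created") || recent_types.contains (some "checkout_started") then "purchase_intent"
    else if recent_types.contains (some "add_to_cart") then "cart_consideration"
    else if recent_types.contains (some "chat_query") then "guided_discovery"
    else "browsing"

-- ===== PORT B =====
def pvTable : PySem.Dict String (Nat × String) :=
  ⟨[("payment_success", (0, "post_purchase")),
    ("order_created", (1, "purchase_intent")),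
    ("checkout_started", (1, "purchase_intent")),
    ("add_to_cart", (2, "cart_consideration")),
    ("chat_query", (3, "guided_discovery"))]⟩

-- one loop iteration of B: look the event's type up, keep the smaller-precedence hit
def pvStep (best : Option (Nat × String)) (event : List (String × String)) : Option (Nat × String) :=
  match PySem.Dict.get? ⟨event⟩ "event_type" with
  | none => best
  | some t =>
    match PySem.Dict.get? pvTable t with
    | none => best
    | some hit =>
      match best with
      | none => some hit
      | some b => if hit.1 < b.1 then some hit else best

def infer_user_intent_py_alt (events : List (List (String × String))) : String :=
  if events = [] then "new_user"
  else
    match (PySem.List.slice events (some (-5)) none).foldl pvStep none with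
    | some b => b.2
    | none => "browsing"

-- ===== PRECONDITION & SPEC =====
def Spec_infer_user_intent_py (events : List (List (String × String))) (out : String) : Prop := out = infer_user_intent_py_alt events
instance (events : List (List (String × String))) (out : String) : Decidable (Spec_infer_user_intent_py events out) := by unfold Spec_infer_user_intent_py; infer_instance

-- ===== CLAIM (what is proved, stated in full; the proofs are below) =====
def Claim_equal_infer_user_intent_py : Prop := ∀ (events : List (List (String × String))), Dom_infer_user_intent_py events → Spec_infer_user_intent_py events (infer_user_intent_py events)

-- ===== LEMMAS AND PROOFS =====

-- precedence of an event type (4 = no signal)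
def pvPrio (t : Option String) : Nat :=
  if t = some "payment_success" then 0
  else if t = some "order_created" then 1
  else if t = some "checkout_started" then 1
  else if t = some "add_to_cart" then 2
  else if t = some "chat_query" then 3
  else 4

def pvToStr : Nat → String
  | 0 => "post_purchase"
  | 1 => "purchase_intent"
  | 2 => "cart_consideration"
  | 3 => "guided_discovery"
  | _ => "browsing"

def pvAcc (n : Nat) : Option (Nat × String) :=
  if n < 4 then some (n, pvToStr n) else none

def pvMinPrio : List (List (String × String)) → Nat
  | [] => 4
  | e :: r => min (pvPrio (pvGetType e)) (pvMinPrio r)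

theorem pvTable_get (t : String) : PySem.Dict.get? pvTable t = pvAcc (pvPrio (some t)) := by
  simp only [pvTable, pvPrio, pvAcc, PySem.Dict.get?_mk_cons]
  split_ifs with h1 h2 h3 h4 h5 <;>
    simp_all [PySem.Dict.get?, pvToStr]

theorem pvStep_acc (n : Nat) (hn : n ≤ 4) (e : List (String × String)) :
    pvStep (pvAcc n) e = pvAcc (min n (pvPrio (pvGetType e))) := by
  unfold pvStep
  cases h : pvGetType e with
  | none =>
      simp only [pvGetType] at h
      rw [h]
      have : pvPrio none = 4 := rfl
      simp [this, Nat.min_eq_left hn]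
  | some t =>
      simp only [pvGetType] at h
      rw [h]
      simp only []
      rw [pvTable_get]
      by_cases hp : pvPrio (some t) < 4
      · simp only [pvAcc, if_pos hp]
        by_cases h4 : n < 4
        · simp only [if_pos h4]
          by_cases hlt : pvPrio (some t) < n
          · rw [if_pos hlt, Nat.min_eq_right (le_of_lt hlt), if_pos hp]
          · rw [if_neg hlt, Nat.min_eq_left (Nat.le_of_not_lt hlt), if_pos h4]
        · have hn4 : n = 4 := le_antisymm hn (Nat.le_of_not_lt h4)
          subst hn4
          simp [hp, Nat.min_eq_right (le_of_lt hp)]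
      · have hp4 : pvPrio (some t) = 4 := by
          have : pvPrio (some t) ≤ 4 := by unfold pvPrio; split_ifs <;> omega
          omega
        simp [pvAcc, hp4, Nat.min_eq_left hn]

theorem pvFold_acc (r : List (List (String × String))) :
    ∀ n, n ≤ 4 → r.foldl pvStep (pvAcc n) = pvAcc (min n (pvMinPrio r)) := by
  induction r with
  | nil => intro n hn; simp [pvMinPrio, Nat.min_eq_left hn]
  | cons e r ih =>
      intro n hn
      have h1 : min n (pvPrio (pvGetType e)) ≤ 4 := le_trans (Nat.min_le_left _ _) hn
      simp only [List.foldl_cons, pvStep_acc n hn e, ih _ h1, pvMinPrio]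
      congr 1
      omega

theorem pvMinPrio_le (r : List (List (String × String))) : pvMinPrio r ≤ 4 := by
  induction r with
  | nil => simp [pvMinPrio]
  | cons e r ih => simp only [pvMinPrio]; omega

theorem pvMinPrio_ge (r : List (List (String × String))) (k : Nat) (hk : k ≤ 4)
    (h : ∀ e ∈ r, k ≤ pvPrio (pvGetType e)) : k ≤ pvMinPrio r := by
  induction r with
  | nil => simpa [pvMinPrio]
  | cons e r ih =>
      have he := h e (List.mem_cons_self ..)
      have ht := ih (fun x hx => h x (List.mem_cons_of_mem _ hx))
      simp only [pvMinPrio]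
      omega

theorem pvMinPrio_ub (r : List (List (String × String))) (e : List (String × String))
    (he : e ∈ r) (k : Nat) (hp : pvPrio (pvGetType e) ≤ k) : pvMinPrio r ≤ k := by
  induction r with
  | nil => cases he
  | cons x r ih =>
      rcases List.mem_cons.mp he with h | h
      · subst h; simp only [pvMinPrio]; omega
      · have := ih h; simp only [pvMinPrio]; omega

-- contains over the mapped list ↔ an element with that type
theorem pvContains_iff (r : List (List (String × String))) (key : String) :
    ((r.map pvGetType).contains (some key) = true) ↔ ∃ e ∈ r, pvGetType e = some key := by
  simp [List.mem_map]

-- characterisation of pvPrio values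
theorem pvPrio_eq_zero_iff (t : Option String) : pvPrio t = 0 ↔ t = some "payment_success" := by
  unfold pvPrio; split_ifs <;> simp_all

theorem pvPrio_le_one_iff (t : Option String) :
    pvPrio t ≤ 1 ↔ t = some "payment_success" ∨ t = some "order_created" ∨ t = some "checkout_started" := by
  unfold pvPrio; split_ifs <;> simp_all

theorem pvPrio_le_two_iff (t : Option String) :
    pvPrio t ≤ 2 ↔ t = some "payment_success" ∨ t = some "order_created" ∨ t = some "checkout_started" ∨ t = some "add_to_cart" := by
  unfold pvPrio; split_ifs <;> simp_all

theorem pvPrio_le_three_iff (t : Option String) :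
    pvPrio t ≤ 3 ↔ t = some "payment_success" ∨ t = some "order_created" ∨ t = some "checkout_started" ∨ t = some "add_to_cart" ∨ t = some "chat_query" := by
  unfold pvPrio; split_ifs <;> simp_all

-- A's if-chain equals pvToStr of the minimum precedence
theorem pvChain_eq (r : List (List (String × String))) :
    (if (r.map pvGetType).contains (some "payment_success") then "post_purchase"
     else if (r.map pvGetType).contains (some "order_created") || (r.map pvGetType).contains (some "checkout_started") then "purchase_intent"
     else if (r.map pvGetType).contains (some "add_to_cart") then "cart_consideration"
     else if (r.map pvGetType).contains (some "chat_query") then "guided_discovery"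
     else "browsing") = pvToStr (pvMinPrio r) := by
  by_cases h0 : (r.map pvGetType).contains (some "payment_success") = true
  · obtain ⟨e, he, ht⟩ := (pvContains_iff r _).mp h0
    have : pvMinPrio r = 0 := Nat.le_zero.mp (pvMinPrio_ub r e he 0 (by rw [ht]; decide))
    rw [if_pos h0, this]
    rfl
  by_cases h1 : ((r.map pvGetType).contains (some "order_created") || (r.map pvGetType).contains (some "checkout_started")) = true
  · have hub : pvMinPrio r ≤ 1 := by
      rcases Bool.or_eq_true_iff.mp h1 with h | h <;>
        obtain ⟨e, he, ht⟩ := (pvContains_iff r _).mp h <;>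
        exact pvMinPrio_ub r e he 1 (by rw [ht]; decide)
    have hlb : 1 ≤ pvMinPrio r := by
      apply pvMinPrio_ge r 1 (by omega)
      intro e he
      by_contra hlt
      have : pvPrio (pvGetType e) = 0 := by omega
      have := (pvPrio_eq_zero_iff _).mp this
      exact h0 ((pvContains_iff r _).mpr ⟨e, he, this⟩)
    have : pvMinPrio r = 1 := le_antisymm hub hlb
    rw [if_neg h0, if_pos h1, this]
    rfl
  by_cases h2 : (r.map pvGetType).contains (some "add_to_cart") = true
  · obtain ⟨e, he, ht⟩ := (pvContains_iff r _).mp h2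
    have hub : pvMinPrio r ≤ 2 := pvMinPrio_ub r e he 2 (by rw [ht]; decide)
    have hlb : 2 ≤ pvMinPrio r := by
      apply pvMinPrio_ge r 2 (by omega)
      intro x hx
      by_contra hlt
      have hle : pvPrio (pvGetType x) ≤ 1 := by omega
      rcases (pvPrio_le_one_iff _).mp hle with h | h | h
      · exact h0 ((pvContains_iff r _).mpr ⟨x, hx, h⟩)
      · exact h1 (Bool.or_eq_true_iff.mpr (Or.inl ((pvContains_iff r _).mpr ⟨x, hx, h⟩)))
      · exact h1 (Bool.or_eq_true_iff.mpr (Or.inr ((pvContains_iff r _).mpr ⟨x, hx, h⟩)))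
    have : pvMinPrio r = 2 := le_antisymm hub hlb
    rw [if_neg h0, if_neg h1, if_pos h2, this]
    rfl
  by_cases h3 : (r.map pvGetType).contains (some "chat_query") = true
  · obtain ⟨e, he, ht⟩ := (pvContains_iff r _).mp h3
    have hub : pvMinPrio r ≤ 3 := pvMinPrio_ub r e he 3 (by rw [ht]; decide)
    have hlb : 3 ≤ pvMinPrio r := by
      apply pvMinPrio_ge r 3 (by omega)
      intro x hx
      by_contra hlt
      have hle : pvPrio (pvGetType x) ≤ 2 := by omega
      rcases (pvPrio_le_two_iff _).mp hle with h | h | h | h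
      · exact h0 ((pvContains_iff r _).mpr ⟨x, hx, h⟩)
      · exact h1 (Bool.or_eq_true_iff.mpr (Or.inl ((pvContains_iff r _).mpr ⟨x, hx, h⟩)))
      · exact h1 (Bool.or_eq_true_iff.mpr (Or.inr ((pvContains_iff r _).mpr ⟨x, hx, h⟩)))
      · exact h2 ((pvContains_iff r _).mpr ⟨x, hx, h⟩)
    have : pvMinPrio r = 3 := le_antisymm hub hlb
    rw [if_neg h0, if_neg h1, if_neg h2, if_pos h3, this]
    rfl
  · have hlb : 4 ≤ pvMinPrio r := by
      apply pvMinPrio_ge r 4 (by omega)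
      intro x hx
      by_contra hlt
      have hle : pvPrio (pvGetType x) ≤ 3 := by omega
      rcases (pvPrio_le_three_iff _).mp hle with h | h | h | h | h
      · exact h0 ((pvContains_iff r _).mpr ⟨x, hx, h⟩)
      · exact h1 (Bool.or_eq_true_iff.mpr (Or.inl ((pvContains_iff r _).mpr ⟨x, hx, h⟩)))
      · exact h1 (Bool.or_eq_true_iff.mpr (Or.inr ((pvContains_iff r _).mpr ⟨x, hx, h⟩)))
      · exact h2 ((pvContains_iff r _).mpr ⟨x, hx, h⟩)
      · exact h3 ((pvContains_iff r _).mpr ⟨x, hx, h⟩)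
    have h4 : pvMinPrio r = 4 := le_antisymm (pvMinPrio_le r) hlb
    rw [if_neg h0, if_neg h1, if_neg h2, if_neg h3, h4]
    rfl

-- B's fold result rendered as a string equals pvToStr of the minimum precedence
theorem pvFold_out (r : List (List (String × String))) :
    (match r.foldl pvStep none with
     | some b => b.2
     | none => "browsing") = pvToStr (pvMinPrio r) := by
  have hnone : (none : Option (Nat × String)) = pvAcc 4 := rfl
  rw [hnone, pvFold_acc r 4 (by omega)]
  have hle := pvMinPrio_le r
  rw [Nat.min_eq_right hle]
  unfold pvAcc
  by_cases h : pvMinPrio r < 4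
  · simp [h]
  · have : pvMinPrio r = 4 := by omega
    simp [this, pvToStr]

-- ===== VERDICT (by name: the statement is the Claim_ definition above) =====
theorem infer_user_intent_py_spec : Claim_equal_infer_user_intent_py := by
  intro events _
  unfold Spec_infer_user_intent_py infer_user_intent_py infer_user_intent_py_alt
  by_cases h : events = []
  · simp [h]
  · simp only [if_neg h]
    rw [pvFold_out, ← pvChain_eq]
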